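-- pv_equiv track=rewrite | github.com/wh-jung0522/AlgorithmStudy | Programmers/Level3/22.AllToZero_fast.py | solution
-- ===== SOURCE A (Python) =====
-- def solution(a, edges):
--     if sum(a) != 0:
--         return -1
--     len_a = len(a)
--     graph = [[] for _ in range(len_a)]
--     for edge in edges: ## O(E)
--         node1, node2 = edge
--         graph[node1].append(node2)
--         graph[node2].append(node1)
--     visited_list = [False for _ in range(len_a)]
--
--     return DFS_fast(graph,0,a,visited_list)[1]
--
-- def DFS_fast(graph, start_node, weight, visited_list):
--     return_sum = weight[start_node]
--     return_count = 0
--     visited_list[start_node] = True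
--
--     for next_node in graph[start_node]:
--         if visited_list[next_node] == False:
--             next_sum, next_count = DFS_fast(graph,next_node,weight,visited_list)
--             return_sum += next_sum
--             return_count += next_count
--     return_count += abs(return_sum)
--     return return_sum, return_count
-- ===== SOURCE B (Python) =====
-- def solution(a, edges):
--     if sum(a) != 0:
--         return -1
--     n = len(a)
--     graph = [[] for _ in range(n)]
--     for edge in edges:
--         node1, node2 = edge
--         graph[node1].append(node2)
--         graph[node2].append(node1)
--     visited = [False] * n
--     parent = [0] * n
--     order = []
--     record(graph, 0, 0, visited, parent, order)
--     value = a[:]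
--     count = 0
--     for node in reversed(order):
--         count += abs(value[node])
--         if node != 0:
--             value[parent[node]] += value[node]
--     return count
--
-- def record(graph, node, par, visited, parent, order):
--     visited[node] = True
--     parent[node] = par
--     order.append(node)
--     for nxt in graph[node]:
--         if not visited[nxt]:
--             record(graph, nxt, node, visited, parent, order)
-- ===== Notes on version B (the rewrite author's own statement) =====
-- stated objective: alternative
-- what changed: A computes the answer inside one DFS by threading a (subtree-sum, operation-count) pair through the recursive return values; B's traversal only records the discovery order and a parent[] array, and the answer is then computed by a separate array-based reverse-order sweep that folds each node's value into its parent's cell and sums absolute values.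
import Mathlib
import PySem

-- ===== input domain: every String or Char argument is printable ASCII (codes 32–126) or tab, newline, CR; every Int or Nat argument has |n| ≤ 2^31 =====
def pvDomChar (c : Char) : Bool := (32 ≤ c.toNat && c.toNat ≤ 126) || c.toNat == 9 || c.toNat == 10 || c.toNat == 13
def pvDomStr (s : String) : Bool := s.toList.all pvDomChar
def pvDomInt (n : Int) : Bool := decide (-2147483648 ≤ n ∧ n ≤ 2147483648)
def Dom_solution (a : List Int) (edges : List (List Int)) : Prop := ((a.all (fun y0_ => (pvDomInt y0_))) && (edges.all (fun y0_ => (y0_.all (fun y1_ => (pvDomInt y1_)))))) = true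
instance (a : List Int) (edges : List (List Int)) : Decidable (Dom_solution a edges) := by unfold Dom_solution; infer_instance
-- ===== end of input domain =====

-- B replaces A's single recursive DFS (threading a (subtree-sum, count) pair through the
-- recursive return values) by a traversal that only records discovery order and a parent[]
-- array, followed by a separate array-based reverse-order sweep; objective: alternative
-- decomposition, same asymptotic cost.


-- ===== PORT A =====
-- one iteration of the adjacency-list build loop (graph[node1].append(node2); graph[node2].append(node1))
def edgeStepA (g : List (List Int)) (e : List Int) : List (List Int) :=
  match e with
  | [n1, n2] =>
    let g1 := PySem.List.pySetD g n1 (PySem.List.pyGetD g n1 [] ++ [n2])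
    PySem.List.pySetD g1 n2 (PySem.List.pyGetD g1 n2 [] ++ [n1])
  | _ => g

-- DFS_fast: returns (return_sum, return_count, visited); fuel = len(a) bounds the recursion
-- depth (each guarded recursive call marks a fresh node, so fuel is never exhausted on Pre_).
def dfsA (G : List (List Int)) (w : List Int) : Nat → Int → List Bool → Int × Int × List Bool
  | 0, _, vis => (0, 0, vis)
  | fuel+1, start, vis =>
    let r := (PySem.List.pyGetD G start []).foldl
      (fun (acc : Int × Int × List Bool) nxt =>
        if PySem.List.pyGetD acc.2.2 nxt false = false then
          let res := dfsA G w fuel nxt acc.2.2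
          (acc.1 + res.1, acc.2.1 + res.2.1, res.2.2)
        else acc)
      (PySem.List.pyGetD w start 0, 0, PySem.List.pySetD vis start true)
    (r.1, r.2.1 + |r.1|, r.2.2)

def solution (a : List Int) (edges : List (List Int)) : Int :=
  if a.sum ≠ 0 then -1
  else
    (dfsA
      (edges.foldl edgeStepA (List.replicate a.length ([] : List Int)))
      a a.length 0 (List.replicate a.length false)).2.1

-- ===== PORT B =====
-- one iteration of B's adjacency-list build loop (same unpacking, written over cons cells)
def edgeStepB (g : List (List Int)) (e : List Int) : List (List Int) :=
  match e with
  | n1 :: rest =>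
    match rest with
    | [n2] =>
      let g1 := PySem.List.pySetD g n1 (PySem.List.pyGetD g n1 [] ++ [n2])
      PySem.List.pySetD g1 n2 (PySem.List.pyGetD g1 n2 [] ++ [n1])
    | _ => g
  | [] => g

-- record: DFS that only marks visited, records parent[node] and appends node to order.
def record (G : List (List Int)) : Nat → Int → Int → List Bool × List Int × List Int → List Bool × List Int × List Int
  | 0, _, _, st => st
  | fuel+1, node, par, st =>
    (PySem.List.pyGetD G node []).foldl
      (fun (st2 : List Bool × List Int × List Int) nxt =>
        if PySem.List.pyGetD st2.1 nxt false = false then record G fuel nxt node st2 else st2)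
      (PySem.List.pySetD st.1 node true, PySem.List.pySetD st.2.1 node par, st.2.2 ++ [node])

-- body of B's reverse-order sweep loop
def stepB (parArr : List Int) (vc : List Int × Int) (node : Int) : List Int × Int :=
  let count := vc.2 + |PySem.List.pyGetD vc.1 node 0|
  if node ≠ 0 then
    let p := PySem.List.pyGetD parArr node 0
    (PySem.List.pySetD vc.1 p (PySem.List.pyGetD vc.1 p 0 + PySem.List.pyGetD vc.1 node 0), count)
  else (vc.1, count)

def solution_alt (a : List Int) (edges : List (List Int)) : Int :=
  if a.sum ≠ 0 then -1
  else
    (fun (st : List Bool × List Int × List Int) =>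
        (st.2.2.reverse.foldl (stepB st.2.1) (a, 0)).2)
      (record
        (edges.foldl edgeStepB (List.replicate a.length ([] : List Int)))
        a.length 0 0
        (List.replicate a.length false, List.replicate a.length (0 : Int), []))

-- ===== PRECONDITION & SPEC =====
-- Pre_ excludes exactly the inputs where A raises: an empty a (weight[0] IndexError when the
-- sum is 0), an edge whose length is not 2 (unpacking ValueError), and an edge entry outside
-- Python's index range [-len(a), len(a)) (IndexError). When sum(a) != 0 A returns -1 before
-- touching edges, so those inputs are all admitted.
def Pre_solution (a : List Int) (edges : List (List Int)) : Prop :=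
  a.sum ≠ 0 ∨
    (a ≠ [] ∧ ∀ e ∈ edges, e.length = 2 ∧ ∀ x ∈ e, -(a.length : Int) ≤ x ∧ x < (a.length : Int))
instance (a : List Int) (edges : List (List Int)) : Decidable (Pre_solution a edges) := by
  unfold Pre_solution; infer_instance

def pvWitness_solution : List Int × List (List Int) := ([3, -1, -2], [[0, 1], [0, 2]])

def Spec_solution (a : List Int) (edges : List (List Int)) (out : Int) : Prop := out = solution_alt a edges
instance (a : List Int) (edges : List (List Int)) (out : Int) : Decidable (Spec_solution a edges out) := by unfold Spec_solution; infer_instance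

-- ===== CLAIM (what is proved, stated in full; the proofs are below) =====
def Claim_equal_solution : Prop := ∀ (a : List Int) (edges : List (List Int)), Dom_solution a edges → Pre_solution a edges → Spec_solution a edges (solution a edges)

-- ===== LEMMAS AND PROOFS =====

-- normalized (Python-wrapped) index of x into a list of length n
def ixn (n : Nat) (x : Int) : Nat := (if x < 0 then x + n else x).toNat
-- x is a valid Python index for length n
def InR (n : Nat) (x : Int) : Prop := -(n : Int) ≤ x ∧ x < (n : Int)

theorem ixn_lt {n : Nat} {x : Int} (h : InR n x) : ixn n x < n := by
  unfold InR at h; unfold ixn; split <;> omega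

theorem ixn_zero (n : Nat) : ixn n 0 = 0 := by unfold ixn; simp

theorem InR_zero {n : Nat} (hn : 0 < n) : InR n 0 := by
  refine ⟨by omega, by exact_mod_cast hn⟩

theorem pyIdx?_eq {n : Nat} {x : Int} (h : InR n x) :
    PySem.List.pyIdx? n x = some (ixn n x) := by
  rcases h with ⟨h1, h2⟩
  unfold PySem.List.pyIdx? ixn
  by_cases h0 : 0 ≤ x
  · rw [if_pos h0, if_pos h2, if_neg (by omega)]
  · rw [if_neg h0, if_pos h1, if_pos (by omega)]
    congr 1; omega

theorem getD_ix {α : Type} {n : Nat} {x : Int} (l : List α) (d : α)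
    (hl : l.length = n) (h : InR n x) :
    PySem.List.pyGetD l x d = l.getD (ixn n x) d := by
  unfold PySem.List.pyGetD PySem.List.pyGet?
  rw [hl, pyIdx?_eq h]
  simp [List.getD_eq_getElem?_getD]

theorem setD_ix {α : Type} {n : Nat} {x : Int} (l : List α) (v : α)
    (hl : l.length = n) (h : InR n x) :
    PySem.List.pySetD l x v = l.set (ixn n x) v := by
  unfold PySem.List.pySetD PySem.List.pySet?
  rw [hl, pyIdx?_eq h]
  simp

theorem getD_set_self {α : Type} {l : List α} {j : Nat} {v d : α} (h : j < l.length) :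
    (l.set j v).getD j d = v := by
  simp [List.getD_eq_getElem?_getD, List.getElem?_set_self h]

theorem getD_set_ne {α : Type} {l : List α} {i j : Nat} {v d : α} (h : i ≠ j) :
    (l.set i v).getD j d = l.getD j d := by
  simp [List.getD_eq_getElem?_getD, List.getElem?_set_ne h]

theorem getD_eq_getElem {α : Type} {l : List α} {j : Nat} {d : α} (h : j < l.length) :
    l.getD j d = l[j] := by
  simp [List.getD_eq_getElem?_getD, List.getElem?_eq_getElem h]

def countFalse (l : List Bool) : Nat := l.countP (fun b => !b)

theorem countFalse_replicate (n : Nat) : countFalse (List.replicate n false) = n := by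
  simp [countFalse, List.countP_replicate]

theorem countFalse_pos {l : List Bool} {j : Nat} (h : j < l.length)
    (hf : l.getD j false = false) : 0 < countFalse l := by
  rw [getD_eq_getElem h] at hf
  have hm : l[j] ∈ l := List.getElem_mem h
  unfold countFalse
  have : List.countP (fun b => !b) l ≠ 0 := by
    intro h0
    have := List.countP_eq_zero.mp h0 _ hm
    rw [hf] at this
    simp at this
  omega

theorem countFalse_set_true {l : List Bool} {j : Nat} (h : j < l.length)
    (hf : l.getD j false = false) : countFalse (l.set j true) + 1 = countFalse l := by
  have hp := countFalse_pos h hf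
  rw [getD_eq_getElem h] at hf
  unfold countFalse at hp ⊢
  rw [List.countP_set h, hf]
  simp
  omega

theorem mem_of_set {α : Type} {l : List α} {k : Nat} {v y : α} (hy : y ∈ l.set k v) :
    y ∈ l ∨ y = v := by
  induction l generalizing k with
  | nil => simp at hy
  | cons a t ih =>
    cases k with
    | zero =>
      simp only [List.set] at hy
      rcases List.mem_cons.mp hy with h | h
      · exact Or.inr h
      · exact Or.inl (List.mem_cons_of_mem _ h)
    | succ k =>
      simp only [List.set] at hy
      rcases List.mem_cons.mp hy with h | h
      · exact Or.inl (by simp [h])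
      · rcases ih h with h' | h'
        · exact Or.inl (List.mem_cons_of_mem _ h')
        · exact Or.inr h'

theorem mem_pySetD {α : Type} {l : List α} {i : Int} {v y : α}
    (hy : y ∈ PySem.List.pySetD l i v) : y ∈ l ∨ y = v := by
  unfold PySem.List.pySetD PySem.List.pySet? at hy
  cases hidx : PySem.List.pyIdx? l.length i with
  | none => rw [hidx] at hy; simpa using Or.inl hy
  | some k => rw [hidx] at hy; simp only [Option.map_some, Option.getD_some] at hy; exact mem_of_set hy

theorem pyGetD_cases {α : Type} (l : List α) (i : Int) (d : α) :
    PySem.List.pyGetD l i d = d ∨ PySem.List.pyGetD l i d ∈ l := by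
  unfold PySem.List.pyGetD PySem.List.pyGet?
  cases hidx : PySem.List.pyIdx? l.length i with
  | none => simp
  | some k =>
    cases hk : l[k]? with
    | none => simp [hk]
    | some a =>
      simp only [Option.bind_some, hk, Option.getD_some]
      exact Or.inr (List.mem_of_getElem? hk)

-- The joint invariant tying A's DFS results to B's recorded segment, parent cells and sweep.
-- vis/par: state before the call; visC/parC: state after; seg: nodes appended to order;
-- s: A's return_sum; c: A's return_count minus |s|.
def Bundle (n : Nat) (w : List Int) (x p : Int) (vis : List Bool) (par : List Int)
    (visC : List Bool) (parC : List Int) (seg : List Int) (s c : Int) : Prop :=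
  visC.length = n ∧ parC.length = n ∧
  (∃ t, seg = x :: t) ∧
  (∀ y ∈ seg, InR n y ∧ vis.getD (ixn n y) false = false ∧ (ixn n y = 0 → y = 0) ∧
    InR n (parC.getD (ixn n y) 0)) ∧
  (seg.map (ixn n)).Nodup ∧
  (∀ j, j < n → visC.getD j false = (vis.getD j false || decide (j ∈ seg.map (ixn n)))) ∧
  (∀ j, j < n → j ∉ seg.map (ixn n) → parC.getD j 0 = par.getD j 0) ∧
  s = (seg.map (fun y => w.getD (ixn n y) 0)).sum ∧
  countFalse visC + seg.length = countFalse vis ∧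
  (∀ (par2 value : List Int) (count δ : Int),
    (∀ y ∈ seg, PySem.List.pyGetD par2 y 0 = parC.getD (ixn n y) 0) →
    value.length = n →
    (∀ y ∈ seg, ixn n y ≠ ixn n x → value.getD (ixn n y) 0 = w.getD (ixn n y) 0) →
    value.getD (ixn n x) 0 = w.getD (ixn n x) 0 + δ →
    (seg.reverse.foldl (stepB par2) (value, count)).2 = count + c + |s + δ| ∧
    (seg.reverse.foldl (stepB par2) (value, count)).1.length = n ∧
    (∀ j, j < n → j ∉ seg.map (ixn n) →
      (seg.reverse.foldl (stepB par2) (value, count)).1.getD j 0 =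
        value.getD j 0 + (if x ≠ 0 ∧ j = ixn n p then s + δ else 0)))

theorem bundle_base {n : Nat} {w : List Int} {x p : Int} {vis : List Bool} {par : List Int}
    (hn : 0 < n) (hv : vis.length = n) (hpar : par.length = n)
    (hx : InR n x) (hxv : vis.getD (ixn n x) false = false)
    (hp : (x = 0 ∧ p = 0) ∨ (vis.getD 0 false = true ∧ InR n p ∧ vis.getD (ixn n p) false = true)) :
    Bundle n w x p vis par (vis.set (ixn n x) true) (par.set (ixn n x) p) [x]
      (w.getD (ixn n x) 0) 0 := by
  have hlt : ixn n x < n := ixn_lt hx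
  have hpInR : InR n p := by
    rcases hp with ⟨_, hp0⟩ | ⟨_, h, _⟩
    · subst hp0; exact InR_zero hn
    · exact h
  have h0corr : ixn n x = 0 → x = 0 := by
    intro h0
    rcases hp with ⟨h1, _⟩ | ⟨h1, _, _⟩
    · exact h1
    · exfalso; rw [h0] at hxv; rw [hxv] at h1; simp at h1
  refine ⟨by simp [hv], by simp [hpar], ⟨[], rfl⟩, ?_, by simp, ?_, ?_, by simp, ?_, ?_⟩
  · intro y hy; rw [List.mem_singleton] at hy; subst hy
    refine ⟨hx, hxv, h0corr, ?_⟩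
    rw [getD_set_self (by omega)]
    exact hpInR
  · intro j hj
    by_cases hjx : j = ixn n x
    · subst hjx; rw [getD_set_self (by omega)]; simp
    · rw [getD_set_ne (fun hh => hjx hh.symm)]; simp [hjx]
  · intro j hj hjm
    have hne : j ≠ ixn n x := by simpa using hjm
    rw [getD_set_ne (fun hh => hne hh.symm)]
  · simpa using countFalse_set_true (l := vis) (by omega) hxv
  · intro par2 value count δ hpa hvl hvo hvx
    simp only [List.reverse_cons, List.reverse_nil, List.nil_append, List.foldl_cons,
      List.foldl_nil]
    have hgv : PySem.List.pyGetD value x 0 = w.getD (ixn n x) 0 + δ := by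
      rw [getD_ix value 0 hvl hx]; exact hvx
    by_cases hx0 : x = 0
    · subst hx0
      simp only [stepB, ne_eq, not_true_eq_false, if_false]
      refine ⟨by rw [hgv]; ring, hvl, ?_⟩
      intro j hj hjm
      simp
    · have hpp : PySem.List.pyGetD par2 x 0 = p := by
        rw [hpa x (List.mem_singleton.mpr rfl), getD_set_self (by omega)]
      simp only [stepB, ne_eq, hx0, not_false_eq_true, if_true]
      rw [hpp, hgv, setD_ix value _ hvl hpInR, getD_ix value 0 hvl hpInR]
      have hplt : ixn n p < n := ixn_lt hpInR
      refine ⟨by ring, by simp [hvl], ?_⟩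
      intro j hj hjm
      have hne : j ≠ ixn n x := by simpa using hjm
      by_cases hjp : j = ixn n p
      · subst hjp
        rw [getD_set_self (by omega)]
        simp
      · rw [getD_set_ne (fun hh => hjp hh.symm)]
        simp [hjp]

theorem bundle_compose {n : Nat} {w : List Int} {x p cnode : Int}
    {vis visC visC2 : List Bool} {par parC parC2 : List Int} {seg segC : List Int}
    {sAcc cAcc sC cC : Int}
    (hn : 0 < n)
    (hp : (x = 0 ∧ p = 0) ∨ (vis.getD 0 false = true ∧ InR n p ∧ vis.getD (ixn n p) false = true))
    (hB1 : Bundle n w x p vis par visC parC seg sAcc cAcc)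
    (hB2 : Bundle n w cnode x visC parC visC2 parC2 segC sC cC) :
    Bundle n w x p vis par visC2 parC2 (seg ++ segC) (sAcc + sC) (cAcc + (cC + |sC|)) := by
  obtain ⟨hL1, hP1, ⟨t1, hseg1⟩, hel1, hnd1, hmk1, hpo1, hs1, hcnt1, hF1⟩ := hB1
  obtain ⟨hL2, hP2, ⟨t2, hseg2⟩, hel2, hnd2, hmk2, hpo2, hs2, hcnt2, hF2⟩ := hB2
  -- cells of seg are marked in visC
  have hsegT : ∀ j, j ∈ seg.map (ixn n) → j < n ∧ visC.getD j false = true := by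
    intro j hj
    obtain ⟨y, hy, rfl⟩ := List.mem_map.mp hj
    have hjlt : ixn n y < n := ixn_lt (hel1 y hy).1
    refine ⟨hjlt, ?_⟩
    rw [hmk1 _ hjlt]
    simp [List.mem_map.mpr ⟨y, hy, rfl⟩]
  -- cells of segC are unvisited in visC, hence unvisited in vis and disjoint from seg cells
  have hsegCF : ∀ y ∈ segC, vis.getD (ixn n y) false = false ∧ ixn n y ∉ seg.map (ixn n) := by
    intro y hy
    have h2 := hel2 y hy
    have hjlt : ixn n y < n := ixn_lt h2.1
    have := hmk1 _ hjlt
    rw [h2.2.1] at this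
    constructor
    · cases hvv : vis.getD (ixn n y) false
      · rfl
      · rw [hvv] at this; simp at this
    · intro hmem
      simp [hmem] at this
  have hdisj : ∀ j, j ∈ seg.map (ixn n) → j ∉ segC.map (ixn n) := by
    intro j hj hj2
    obtain ⟨y, hy, rfl⟩ := List.mem_map.mp hj2
    exact absurd hj (hsegCF y hy).2
  -- parC2 agrees with parC on seg cells
  have hparEq : ∀ y ∈ seg, parC2.getD (ixn n y) 0 = parC.getD (ixn n y) 0 := by
    intro y hy
    have hjlt : ixn n y < n := ixn_lt (hel1 y hy).1
    exact hpo2 _ hjlt (fun hm => hdisj _ (List.mem_map.mpr ⟨y, hy, rfl⟩) hm)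
  -- the 0 cell is marked in visC
  have hzero : visC.getD 0 false = true := by
    rcases hp with ⟨hx0, _⟩ | ⟨h0, _, _⟩
    · subst hx0
      exact (hsegT 0 (by rw [hseg1]; simp [ixn_zero])).2
    · rw [hmk1 0 hn, h0]; simp
  have hcne0 : cnode ≠ 0 := by
    intro h
    subst h
    have := (hel2 0 (by rw [hseg2]; simp)).2.1
    rw [ixn_zero, hzero] at this
    simp at this
  have hxmem : x ∈ seg := by rw [hseg1]; simp
  have hixx : ixn n x ∈ seg.map (ixn n) := List.mem_map.mpr ⟨x, hxmem, rfl⟩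
  have hicx : ixn n cnode ≠ ixn n x := by
    intro h
    have : ixn n cnode ∈ seg.map (ixn n) := h ▸ hixx
    exact hdisj _ this (List.mem_map.mpr ⟨cnode, by rw [hseg2]; simp, rfl⟩)
  refine ⟨hL2, hP2, ⟨t1 ++ segC, by rw [hseg1]; simp⟩, ?_, ?_, ?_, ?_, ?_, ?_, ?_⟩
  · intro y hy
    rcases List.mem_append.mp hy with h | h
    · have h1 := hel1 y h
      exact ⟨h1.1, h1.2.1, h1.2.2.1, by rw [hparEq y h]; exact h1.2.2.2⟩
    · have h2 := hel2 y h
      exact ⟨h2.1, (hsegCF y h).1, h2.2.2.1, h2.2.2.2⟩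
  · rw [List.map_append]
    exact List.Nodup.append hnd1 hnd2 (fun j hj hj2 => hdisj j hj hj2)
  · intro j hj
    rw [hmk2 j hj, hmk1 j hj, List.map_append]
    simp [List.mem_append, Bool.or_assoc]
  · intro j hj hjm
    rw [List.map_append] at hjm
    rw [hpo2 j hj (fun h => hjm (List.mem_append.mpr (Or.inr h))),
      hpo1 j hj (fun h => hjm (List.mem_append.mpr (Or.inl h)))]
  · rw [List.map_append, List.sum_append, hs1, hs2]
  · rw [List.length_append]
    omega
  · intro par2 value count δ hpa hvl hvo hvx
    have hpaC : ∀ y ∈ segC, PySem.List.pyGetD par2 y 0 = parC2.getD (ixn n y) 0 :=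
      fun y hy => hpa y (List.mem_append.mpr (Or.inr hy))
    have hpaS : ∀ y ∈ seg, PySem.List.pyGetD par2 y 0 = parC.getD (ixn n y) 0 :=
      fun y hy => (hpa y (List.mem_append.mpr (Or.inl hy))).trans (hparEq y hy)
    have hvoC : ∀ y ∈ segC, ixn n y ≠ ixn n cnode → value.getD (ixn n y) 0 = w.getD (ixn n y) 0 := by
      intro y hy _
      refine hvo y (List.mem_append.mpr (Or.inr hy)) ?_
      intro h
      exact hdisj _ (h ▸ hixx) (List.mem_map.mpr ⟨y, hy, rfl⟩)
    have hvxC : value.getD (ixn n cnode) 0 = w.getD (ixn n cnode) 0 + 0 := by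
      rw [add_zero]
      refine hvo cnode (List.mem_append.mpr (Or.inr (by rw [hseg2]; simp))) hicx
    obtain ⟨hm2, hml, hmo⟩ := hF2 par2 value count 0 hpaC hvl hvoC hvxC
    set mid := segC.reverse.foldl (stepB par2) (value, count) with hmid
    have hvoS : ∀ y ∈ seg, ixn n y ≠ ixn n x → mid.1.getD (ixn n y) 0 = w.getD (ixn n y) 0 := by
      intro y hy hyx
      have hjlt : ixn n y < n := ixn_lt (hel1 y hy).1
      rw [hmo _ hjlt (fun h => hdisj _ (List.mem_map.mpr ⟨y, hy, rfl⟩) h)]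
      rw [hvo y (List.mem_append.mpr (Or.inl hy)) hyx]
      simp [hyx]
    have hvxS : mid.1.getD (ixn n x) 0 = w.getD (ixn n x) 0 + (δ + sC) := by
      rw [hmo _ (ixn_lt (hel1 x hxmem).1) (hdisj _ hixx)]
      rw [hvx]
      simp [hcne0]
      ring
    obtain ⟨hf2, hfl, hfo⟩ := hF1 par2 mid.1 mid.2 (δ + sC) hpaS hml hvoS hvxS
    have hrw : (seg ++ segC).reverse.foldl (stepB par2) (value, count) =
        seg.reverse.foldl (stepB par2) mid := by
      rw [List.reverse_append, List.foldl_append, hmid]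
    refine ⟨?_, ?_, ?_⟩
    · rw [hrw, hf2, hm2]
      have : sAcc + (δ + sC) = sAcc + sC + δ := by ring
      rw [this, add_zero]
      ring
    · rw [hrw]; exact hfl
    · intro j hj hjm
      rw [List.map_append] at hjm
      have hjS : j ∉ seg.map (ixn n) := fun h => hjm (List.mem_append.mpr (Or.inl h))
      have hjC : j ∉ segC.map (ixn n) := fun h => hjm (List.mem_append.mpr (Or.inr h))
      have hjx : j ≠ ixn n x := fun h => hjS (h ▸ hixx)
      rw [hrw, hfo j hj hjS, hmo j hj hjC]
      simp [hjx, hcne0]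
      split_ifs with hc
      · ring
      · ring

theorem MAIN {n : Nat} (hn : 0 < n) (G : List (List Int)) (hG : G.length = n)
    (hGm : ∀ l ∈ G, ∀ y ∈ l, InR n y) (w : List Int) (hw : w.length = n) :
    ∀ (fuel : Nat) (x p : Int) (vis : List Bool) (par ord : List Int),
    countFalse vis ≤ fuel → vis.length = n → par.length = n →
    InR n x → vis.getD (ixn n x) false = false →
    ((x = 0 ∧ p = 0) ∨ (vis.getD 0 false = true ∧ InR n p ∧ vis.getD (ixn n p) false = true)) →
    ∃ seg visC parC s c,
      dfsA G w fuel x vis = (s, c + |s|, visC) ∧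
      record G fuel x p (vis, par, ord) = (visC, parC, ord ++ seg) ∧
      Bundle n w x p vis par visC parC seg s c := by
  intro fuel
  induction fuel with
  | zero =>
    intro x p vis par ord hcf hv hpl hInR hxv hp0
    exfalso
    have := countFalse_pos (l := vis) (by rw [hv]; exact ixn_lt hInR) hxv
    omega
  | succ fuel ih =>
    intro x p vis par ord hcf hv hpl hInR hxv hp0
    have hlt : ixn n x < n := ixn_lt hInR
    have hvis1 : PySem.List.pySetD vis x true = vis.set (ixn n x) true := setD_ix vis true hv hInR
    have hpar1 : PySem.List.pySetD par x p = par.set (ixn n x) p := setD_ix par p hpl hInR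
    have hw0 : PySem.List.pyGetD w x 0 = w.getD (ixn n x) 0 := getD_ix w 0 hw hInR
    have hbase := bundle_base (w := w) hn hv hpl hInR hxv hp0
    have hcmem : ∀ c' ∈ PySem.List.pyGetD G x [], InR n c' := by
      rcases pyGetD_cases G x [] with h | h
      · rw [h]; intro c' hc'; simp at hc'
      · exact hGm _ h
    have hcf1 : countFalse (vis.set (ixn n x) true) ≤ fuel := by
      have := countFalse_set_true (l := vis) (by omega) hxv
      omega
    have inner : ∀ (cs' : List Int), (∀ c' ∈ cs', InR n c') →
        ∀ (sAcc cAcc : Int) (visC : List Bool) (parC ordC : List Int) (seg : List Int),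
        countFalse visC ≤ fuel →
        Bundle n w x p vis par visC parC seg sAcc cAcc →
        ∃ ext visC' parC' s' c',
          cs'.foldl (fun (acc : Int × Int × List Bool) nxt =>
            if PySem.List.pyGetD acc.2.2 nxt false = false then
              let res := dfsA G w fuel nxt acc.2.2
              (acc.1 + res.1, acc.2.1 + res.2.1, res.2.2)
            else acc) (sAcc, cAcc, visC) = (s', c', visC') ∧
          cs'.foldl (fun (st2 : List Bool × List Int × List Int) nxt =>
            if PySem.List.pyGetD st2.1 nxt false = false then record G fuel nxt x st2 else st2)
            (visC, parC, ordC) = (visC', parC', ordC ++ ext) ∧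
          Bundle n w x p vis par visC' parC' (seg ++ ext) s' c' := by
      intro cs'
      induction cs' with
      | nil =>
        intro _ sAcc cAcc visC parC ordC seg _ hB
        exact ⟨[], visC, parC, sAcc, cAcc, rfl, by simp, by simpa using hB⟩
      | cons c' rest ihc =>
        intro hmem sAcc cAcc visC parC ordC seg hcfC hB
        obtain ⟨hLv, hLp, hhead, helem, hnd, hmk, hpo, hsum, hcnt, hF⟩ := hB
        have hc'InR : InR n c' := hmem c' (by simp)
        have hrest : ∀ c'' ∈ rest, InR n c'' := fun c'' h => hmem c'' (by simp [h])
        have hguard : PySem.List.pyGetD visC c' false = visC.getD (ixn n c') false :=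
          getD_ix _ _ hLv hc'InR
        by_cases hvisited : visC.getD (ixn n c') false = false
        · -- recurse into the child
          -- the head of seg is marked in visC, and the 0 cell is marked
          have hxmem : x ∈ seg := by obtain ⟨t, ht⟩ := hhead; rw [ht]; simp
          have hxcell : visC.getD (ixn n x) false = true := by
            rw [hmk _ (ixn_lt hInR)]
            simp [List.mem_map.mpr ⟨x, hxmem, rfl⟩]
          have hzero : visC.getD 0 false = true := by
            rcases hp0 with ⟨hx0, _⟩ | ⟨h0, _, _⟩
            · subst hx0; rw [← ixn_zero n]; exact hxcell
            · rw [hmk 0 hn, h0]; simp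
          have hchild := ih c' x visC parC ordC hcfC hLv hLp hc'InR hvisited
            (Or.inr ⟨hzero, hInR, hxcell⟩)
          obtain ⟨segC, visC2, parC2, sC, cC, hdfs, hrec, hBC⟩ := hchild
          have hBnew := bundle_compose hn hp0
            ⟨hLv, hLp, hhead, helem, hnd, hmk, hpo, hsum, hcnt, hF⟩ hBC
          have hcf2 : countFalse visC2 ≤ fuel := by
            obtain ⟨_, _, _, _, _, _, _, _, hcnt2, _⟩ := hBnew
            rw [List.length_append] at hcnt2
            omega
          obtain ⟨ext, visC', parC', s', c', hA', hB', hBun'⟩ :=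
            ihc hrest (sAcc + sC) (cAcc + (cC + |sC|)) visC2 parC2 (ordC ++ segC)
              (seg ++ segC) hcf2 hBnew
          refine ⟨segC ++ ext, visC', parC', s', c', ?_, ?_, ?_⟩
          · rw [List.foldl_cons]
            simp only [hguard, hvisited, if_true, hdfs]
            exact hA'
          · rw [List.foldl_cons]
            simp only [hguard, hvisited, if_true, hrec]
            rw [hB', List.append_assoc]
          · rw [← List.append_assoc]; exact hBun'
        · -- child already visited: both sides skip
          have hskip : visC.getD (ixn n c') false = true := by
            cases h : visC.getD (ixn n c') false
            · exact absurd h hvisited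
            · rfl
          have hg : ¬ (PySem.List.pyGetD visC c' false = false) := by
            rw [hguard, hskip]; simp
          obtain ⟨ext, visC', parC', s', c', hA', hB', hBun'⟩ :=
            ihc hrest sAcc cAcc visC parC ordC seg hcfC
              ⟨hLv, hLp, hhead, helem, hnd, hmk, hpo, hsum, hcnt, hF⟩
          refine ⟨ext, visC', parC', s', c', ?_, ?_, hBun'⟩
          · rw [List.foldl_cons, if_neg hg]; exact hA'
          · rw [List.foldl_cons, if_neg hg]; exact hB'
    obtain ⟨ext, visC', parC', s', c', hA, hB, hBun⟩ :=
      inner (PySem.List.pyGetD G x []) hcmem (w.getD (ixn n x) 0) 0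
        (vis.set (ixn n x) true) (par.set (ixn n x) p) (ord ++ [x]) [x] hcf1 hbase
    refine ⟨[x] ++ ext, visC', parC', s', c', ?_, ?_, hBun⟩
    · have hstep : dfsA G w (fuel + 1) x vis =
          (fun (r : Int × Int × List Bool) => (r.1, r.2.1 + |r.1|, r.2.2))
            ((PySem.List.pyGetD G x []).foldl
              (fun (acc : Int × Int × List Bool) nxt =>
                if PySem.List.pyGetD acc.2.2 nxt false = false then
                  let res := dfsA G w fuel nxt acc.2.2
                  (acc.1 + res.1, acc.2.1 + res.2.1, res.2.2)
                else acc)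
              (PySem.List.pyGetD w x 0, 0, PySem.List.pySetD vis x true)) := rfl
      rw [hstep, hw0, hvis1, hA]
    · have hstep : record G (fuel + 1) x p (vis, par, ord) =
          (PySem.List.pyGetD G x []).foldl
            (fun (st2 : List Bool × List Int × List Int) nxt =>
              if PySem.List.pyGetD st2.1 nxt false = false then record G fuel nxt x st2 else st2)
            (PySem.List.pySetD vis x true, PySem.List.pySetD par x p, ord ++ [x]) := rfl
      rw [hstep, hvis1, hpar1, hB, List.append_assoc]

theorem build_ok (n : Nat) : ∀ (edges : List (List Int)) (g₀ : List (List Int)),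
    (∀ e ∈ edges, e.length = 2 ∧ ∀ x ∈ e, -(n : Int) ≤ x ∧ x < (n : Int)) →
    g₀.length = n → (∀ l ∈ g₀, ∀ y ∈ l, InR n y) →
    (edges.foldl edgeStepA g₀).length = n ∧
    (∀ l ∈ (edges.foldl edgeStepA g₀), ∀ y ∈ l, InR n y) := by
  intro edges
  induction edges with
  | nil => intro g₀ _ h1 h2; exact ⟨h1, h2⟩
  | cons e rest ihe =>
    intro g₀ hpre h1 h2
    obtain ⟨hlen2, hxr⟩ := hpre e (by simp)
    have hrest : ∀ e' ∈ rest, e'.length = 2 ∧ ∀ x ∈ e', -(n : Int) ≤ x ∧ x < (n : Int) :=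
      fun e' h => hpre e' (by simp [h])
    rcases e with _ | ⟨n1, e⟩; · simp at hlen2
    rcases e with _ | ⟨n2, e⟩; · simp at hlen2
    rcases e with _ | ⟨n3, e⟩
    · -- e = [n1, n2]
      have hn1 : InR n n1 := hxr n1 (by simp)
      have hn2 : InR n n2 := hxr n2 (by simp)
      rw [List.foldl_cons]
      simp only [edgeStepA]
      have step : ∀ (g : List (List Int)), g.length = n → (∀ l ∈ g, ∀ y ∈ l, InR n y) →
          ∀ (m1 m2 : Int), InR n m1 → InR n m2 →
          (PySem.List.pySetD g m1 (PySem.List.pyGetD g m1 [] ++ [m2])).length = n ∧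
          (∀ l ∈ PySem.List.pySetD g m1 (PySem.List.pyGetD g m1 [] ++ [m2]),
            ∀ y ∈ l, InR n y) := by
        intro g hg hgm m1 m2 _ hm2
        constructor
        · rw [PySem.List.length_pySetD]; exact hg
        · intro l hl y hy
          rcases mem_pySetD hl with h | h
          · exact hgm l h y hy
          · subst h
            rcases List.mem_append.mp hy with h | h
            · rcases pyGetD_cases g m1 [] with hc | hc
              · rw [hc] at h; simp at h
              · exact hgm _ hc y h
            · rw [List.mem_singleton] at h; subst h; exact hm2
      obtain ⟨hga, hgb⟩ := step g₀ h1 h2 n1 n2 hn1 hn2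
      obtain ⟨hgc, hgd⟩ := step _ hga hgb n2 n1 hn2 hn1
      exact ihe _ hrest hgc hgd
    · simp at hlen2

-- ===== VERDICT (by name: the statement is the Claim_ definition above) =====
theorem solution_spec : Claim_equal_solution := by
  unfold Claim_equal_solution
  intro a edges _ hpre
  unfold Spec_solution solution solution_alt
  by_cases hs : a.sum = 0
  · rw [if_neg (by simp [hs]), if_neg (by simp [hs])]
    rcases hpre with h | ⟨hne, hedges⟩
    · exact absurd hs h
    have hn : 0 < a.length := by
      cases a with
      | nil => exact absurd rfl hne
      | cons _ _ => simp
    have hfun : edgeStepB = edgeStepA := by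
      funext g e
      rcases e with _ | ⟨n1, _ | ⟨n2, _ | ⟨m, r⟩⟩⟩ <;> rfl
    rw [hfun]
    obtain ⟨hG, hGm⟩ := build_ok a.length edges (List.replicate a.length []) hedges (by simp)
      (by intro l hl y hy; rw [List.eq_of_mem_replicate hl] at hy; simp at hy)
    obtain ⟨seg, visC, parC, s, c, hA, hR, hBun⟩ :=
      MAIN hn _ hG hGm a rfl a.length 0 0 (List.replicate a.length false)
        (List.replicate a.length (0 : Int)) []
        (le_of_eq (countFalse_replicate _)) (by simp) (by simp) (InR_zero hn)
        (by rw [ixn_zero]; exact List.getD_replicate false hn)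
        (Or.inl ⟨rfl, rfl⟩)
    rw [hA, hR]
    obtain ⟨hLv, hLp, hhead, helem, hnd, hmk, hpo, hsum, hcnt, hF⟩ := hBun
    obtain ⟨hf2, -, -⟩ := hF parC a 0 0
      (fun y hy => getD_ix parC 0 hLp (helem y hy).1) rfl (fun y hy _ => rfl) (by ring)
    simp only [List.nil_append]
    rw [hf2]
    simp
  · rw [if_pos hs, if_pos hs]
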